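-- pv_equiv track=rewrite | github.com/hexagonbio/geneML | src/geneml/main.py | reorder_contigs
-- ===== SOURCE A (Python) =====
-- def reorder_contigs(contigs, num_cores) -> list[tuple[str, str]]:
--     """
--     Reorders contigs by size to balance the workload across processes.
--     """
--     contigs_by_size = sorted(contigs.items(), key=lambda x: len(x[1]), reverse=False)
--     if len(contigs_by_size) < num_cores * 2:
--         return contigs_by_size
--
--     reordered_contigs = []
--     num_groups = max(num_cores, 8)
--     offset = len(contigs_by_size) // num_groups + 1
--     for i in range(offset):
--         for j in range(0, len(contigs_by_size), offset):
--             if j + i < len(contigs_by_size):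
--                 reordered_contigs.append(contigs_by_size[j + i])
--     assert len(reordered_contigs) == len(contigs_by_size), f'failed to reorder contigs, {len(reordered_contigs)} != {len(contigs_by_size)}'
--     return reordered_contigs
-- ===== SOURCE B (Python) =====
-- def reorder_contigs(contigs, num_cores) -> list[tuple[str, str]]:
--     """
--     Same balancing reorder, as a single pass with a closed-form source index:
--     the output is cbs viewed through an explicit permutation, computed
--     arithmetically per position instead of by nested loops over the grid.
--     """
--     cbs = sorted(contigs.items(), key=lambda x: len(x[1]))
--     n = len(cbs)
--     if n < num_cores * 2:
--         return cbs
--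
--     offset = n // max(num_cores, 8) + 1
--     m = (n + offset - 1) // offset        # number of rows of length <= offset
--     last = n - offset * (m - 1)           # columns < last have m entries, the rest m - 1
--
--     def src(q):
--         if q < last * m:
--             c, r = divmod(q, m)
--         else:
--             c2, r = divmod(q - last * m, m - 1)
--             c = last + c2
--         return r * offset + c
--
--     return [cbs[src(q)] for q in range(n)]
-- ===== Notes on version B (the rewrite author's own statement) =====
-- stated objective: alternative
-- what changed: A gathers the output with two nested loops over the column/row grid; B instead computes, for each output position q, a closed-form source index (inverting the grid layout arithmetically with divmod) and builds the result in one flat pass over range(n).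
import Mathlib
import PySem

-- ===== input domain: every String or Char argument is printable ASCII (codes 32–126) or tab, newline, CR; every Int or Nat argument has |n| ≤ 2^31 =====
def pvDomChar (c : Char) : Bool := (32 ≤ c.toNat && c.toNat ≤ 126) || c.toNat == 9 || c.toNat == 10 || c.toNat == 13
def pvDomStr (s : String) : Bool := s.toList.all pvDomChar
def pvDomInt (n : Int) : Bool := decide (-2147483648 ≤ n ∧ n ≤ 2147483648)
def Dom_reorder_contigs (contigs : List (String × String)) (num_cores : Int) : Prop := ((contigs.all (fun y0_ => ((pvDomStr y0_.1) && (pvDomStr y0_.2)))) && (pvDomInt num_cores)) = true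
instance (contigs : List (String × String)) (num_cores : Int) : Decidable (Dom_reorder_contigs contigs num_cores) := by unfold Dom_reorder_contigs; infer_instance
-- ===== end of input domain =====

-- B replaces A's nested gather loops by a single pass that reads each output
-- position through a closed-form source-index permutation; alternative algorithm,
-- same asymptotic cost. (The Python `assert` of A compares lengths of the same
-- rearrangement and always holds — A never raises — so it is not ported.)

-- ===== PORT A =====
def reorder_contigs (contigs : List (String × String)) (num_cores : Int) : List (String × String) :=
  let contigs_by_size := PySem.List.sorted contigs (fun x => PySem.Str.len x.2) false
  if PySem.List.len contigs_by_size < num_cores * 2 then contigs_by_size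
  else
    let num_groups := max num_cores 8
    let offset := PySem.Int.floordiv (PySem.List.len contigs_by_size) num_groups + 1
    (PySem.List.pyRange 0 offset 1).foldl (fun acc i =>
      (PySem.List.pyRange 0 (PySem.List.len contigs_by_size) offset).foldl (fun acc2 j =>
        if j + i < PySem.List.len contigs_by_size then
          acc2 ++ [PySem.List.pyGetD contigs_by_size (j + i) ("", "")]
        else acc2) acc) []

-- ===== PORT B =====
-- helper `src` of Source B; `divmod(q, d)` with the divisor provably nonzero is
-- ported exactly as (floordiv q d, mod q d)
def pvSrc (last m off q : Int) : Int :=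
  if q < last * m then
    (PySem.Int.mod q m) * off + PySem.Int.floordiv q m
  else
    (PySem.Int.mod (q - last * m) (m - 1)) * off +
      (last + PySem.Int.floordiv (q - last * m) (m - 1))

def reorder_contigs_alt (contigs : List (String × String)) (num_cores : Int) : List (String × String) :=
  let cbs := PySem.List.sorted contigs (fun x => PySem.Str.len x.2) false
  let n := PySem.List.len cbs
  if n < num_cores * 2 then cbs
  else
    let offset := PySem.Int.floordiv n (max num_cores 8) + 1
    let m := PySem.Int.floordiv (n + offset - 1) offset
    let last := n - offset * (m - 1)
    -- cbs[src(q)]: src(q) is always in range, so the Python indexing never raises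
    (PySem.List.pyRange 0 n 1).map (fun q => PySem.List.pyGetD cbs (pvSrc last m offset q) ("", ""))

-- ===== PRECONDITION & SPEC =====
def Spec_reorder_contigs (contigs : List (String × String)) (num_cores : Int) (out : List (String × String)) : Prop := out = reorder_contigs_alt contigs num_cores
instance (contigs : List (String × String)) (num_cores : Int) (out : List (String × String)) : Decidable (Spec_reorder_contigs contigs num_cores out) := by unfold Spec_reorder_contigs; infer_instance

-- ===== CLAIM (what is proved, stated in full; the proofs are below) =====
def Claim_equal_reorder_contigs : Prop := ∀ (contigs : List (String × String)) (num_cores : Int), Dom_reorder_contigs contigs num_cores → Spec_reorder_contigs contigs num_cores (reorder_contigs contigs num_cores)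

-- ===== LEMMAS AND PROOFS =====

-- number of entries of column i of the offset-grid (mN rows, last row lastN wide)
def pvCnt (mN lastN i : Nat) : Nat := if i < lastN then mN else mN - 1

-- position in A's output where column i starts
def pvStart (mN lastN i : Nat) : Nat :=
  if i < lastN then i * mN else lastN * mN + (i - lastN) * (mN - 1)

theorem pvStart_zero (mN lastN : Nat) : pvStart mN lastN 0 = 0 := by
  unfold pvStart
  by_cases h : 0 < lastN
  · rw [if_pos h, Nat.zero_mul]
  · rw [if_neg h, show lastN = 0 by omega]
    simp

theorem pvStart_succ (mN lastN i : Nat) :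
    pvStart mN lastN (i + 1) = pvStart mN lastN i + pvCnt mN lastN i := by
  unfold pvStart pvCnt
  by_cases h : i < lastN
  · rw [if_pos h]
    by_cases h' : i + 1 < lastN
    · rw [if_pos h', if_pos h]; ring
    · rw [if_neg h', if_pos h]
      have : lastN = i + 1 := by omega
      subst this
      simp [Nat.succ_mul]
  · rw [if_neg h, if_neg (by omega), if_neg h]
    have : i + 1 - lastN = (i - lastN) + 1 := by omega
    rw [this, Nat.succ_mul]
    ring

-- A's output positions tile [0, pvStart K) column block by column block
theorem pvRange_flat (mN lastN : Nat) : ∀ (K : Nat),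
    (List.range K).flatMap (fun i => (List.range (pvCnt mN lastN i)).map (fun r => pvStart mN lastN i + r))
      = List.range (pvStart mN lastN K) := by
  intro K
  induction K with
  | zero => simp [pvStart_zero]
  | succ K ih =>
    rw [List.range_succ, List.flatMap_append, ih, pvStart_succ, List.range_add]
    simp

-- total size of all columns
theorem pvStart_total (mN lastN offn nn : Nat) (hl2 : lastN ≤ offn)
    (hsum : (mN - 1) * offn + lastN = nn) (hm : 1 ≤ mN) :
    pvStart mN lastN offn = nn := by
  unfold pvStart
  rw [if_neg (by omega)]
  obtain ⟨a, rfl⟩ : ∃ a, offn = lastN + a := ⟨offn - lastN, by omega⟩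
  obtain ⟨b, rfl⟩ : ∃ b, mN = b + 1 := ⟨mN - 1, by omega⟩
  simp only [Nat.add_sub_cancel, Nat.add_sub_cancel_left] at hsum ⊢
  subst hsum
  ring

-- 'if p(x): out.append(f(x))' folded over a list is the filterMap of its body
theorem pv_foldl_ite_append {β : Type} (p : Int → Prop) [DecidablePred p] (f : Int → β) :
    ∀ (l : List Int) (acc : List β),
      l.foldl (fun a x => if p x then a ++ [f x] else a) acc
        = acc ++ l.filterMap (fun x => if p x then some (f x) else none) := by
  intro l
  induction l with
  | nil => simp
  | cons x t ih =>
    intro acc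
    by_cases h : p x <;> simp [h, ih]

-- a filterMap keeping exactly the first c indices of range m is a map over range c
theorem pv_filterMap_range_prefix {β : Type} (f : Nat → β) (c m : Nat) (h : c ≤ m) :
    (List.range m).filterMap (fun k => if k < c then some (f k) else none)
      = (List.range c).map f := by
  obtain ⟨d, rfl⟩ : ∃ d, m = c + d := ⟨m - c, by omega⟩
  rw [List.range_add, List.filterMap_append]
  have h1 : (List.range c).filterMap (fun k => if k < c then some (f k) else none)
      = (List.range c).map f := by
    rw [List.filterMap_congr (g := some ∘ f)
      (by intro x hx; simp [List.mem_range.mp hx])]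
    exact congrFun List.filterMap_eq_map _
  have h2 : ((List.range d).map (fun x => c + x)).filterMap
      (fun k => if k < c then some (f k) else none) = [] := by
    rw [List.filterMap_eq_nil_iff]
    intro x hx
    obtain ⟨y, _, rfl⟩ := List.mem_map.mp hx
    rw [if_neg (by omega)]
  rw [h1, h2, List.append_nil]

-- the grid facts: row count mN, last-row width lastN
theorem pv_grid_facts (nn offn mN : Nat) (hoff : 1 ≤ offn) (hnn : 1 ≤ nn)
    (hmdef : (nn + offn - 1) / offn = mN) :
    1 ≤ mN ∧
    1 ≤ nn - (mN - 1) * offn ∧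
    nn - (mN - 1) * offn ≤ offn ∧
    (mN - 1) * offn + (nn - (mN - 1) * offn) = nn := by
  have hm1 : 1 ≤ mN := by
    rw [← hmdef, Nat.le_div_iff_mul_le (by omega)]; omega
  have h1 := Nat.div_add_mod (nn + offn - 1) offn
  have h2 : (nn + offn - 1) % offn < offn := Nat.mod_lt _ (by omega)
  rw [hmdef] at h1
  obtain ⟨b, rfl⟩ : ∃ b, mN = b + 1 := ⟨mN - 1, by omega⟩
  simp only [Nat.add_sub_cancel]
  rw [Nat.mul_add, Nat.mul_one] at h1
  have hcomm : offn * b = b * offn := Nat.mul_comm _ _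
  omega

-- the closed-form source index inverts the (column, row) position map
theorem pv_src_eq (offn mN lastN i r : Nat)
    (hl1 : 1 ≤ lastN) (hi_cnt : r < pvCnt mN lastN i) :
    pvSrc (lastN : Int) (mN : Int) (offn : Int) ((pvStart mN lastN i + r : Nat) : Int)
      = (offn : Int) * (r : Int) + (i : Int) := by
  unfold pvSrc pvStart pvCnt at *
  by_cases h : i < lastN
  · rw [if_pos h] at hi_cnt ⊢
    have hlt : i * mN + r < lastN * mN := by
      calc i * mN + r < i * mN + mN := by omega
        _ = (i + 1) * mN := by ring
        _ ≤ lastN * mN := Nat.mul_le_mul_right _ (by omega)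
    rw [if_pos (by exact_mod_cast hlt)]
    have hdiv : (i * mN + r) / mN = i := by
      rw [Nat.mul_comm i mN, Nat.mul_add_div (by omega), Nat.div_eq_of_lt hi_cnt, Nat.add_zero]
    have hmod : (i * mN + r) % mN = r := by
      rw [Nat.mul_comm i mN, Nat.mul_add_mod, Nat.mod_eq_of_lt hi_cnt]
    rw [PySem.Int.floordiv_natCast, PySem.Int.mod_natCast, hdiv, hmod]
    push_cast; ring
  · rw [if_neg h] at hi_cnt ⊢
    obtain ⟨b, rfl⟩ : ∃ b, mN = b + 1 := ⟨mN - 1, by omega⟩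
    obtain ⟨a, rfl⟩ : ∃ a, i = lastN + a := ⟨i - lastN, by omega⟩
    simp only [Nat.add_sub_cancel, Nat.add_sub_cancel_left] at hi_cnt ⊢
    rw [if_neg (by push_cast; nlinarith [Nat.zero_le (a * b + r), Int.natCast_nonneg (a * b + r)])]
    have harg : ((lastN * (b + 1) + a * b + r : Nat) : Int) - (lastN : Int) * ((b + 1 : Nat) : Int)
        = ((a * b + r : Nat) : Int) := by push_cast; ring
    have hm1 : ((b + 1 : Nat) : Int) - 1 = ((b : Nat) : Int) := by push_cast; ring
    rw [harg, hm1]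
    have hdiv : (a * b + r) / b = a := by
      rw [Nat.mul_comm a b, Nat.mul_add_div (by omega), Nat.div_eq_of_lt hi_cnt, Nat.add_zero]
    have hmod : (a * b + r) % b = r := by
      rw [Nat.mul_comm a b, Nat.mul_add_mod, Nat.mod_eq_of_lt hi_cnt]
    rw [PySem.Int.floordiv_natCast, PySem.Int.mod_natCast, hdiv, hmod]
    push_cast; ring

-- A's loop guard, on row k of column i, is exactly k < pvCnt
theorem pv_guard_iff (offn mN lastN nn i k : Nat)
    (hl1 : 1 ≤ lastN) (hl2 : lastN ≤ offn)
    (hsum : (mN - 1) * offn + lastN = nn) (hm : 1 ≤ mN)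
    (hi : i < offn) (hk : k < mN) :
    ((offn : Int) * (k : Int) + (i : Int) < (nn : Int)) ↔ k < pvCnt mN lastN i := by
  rw [show (offn : Int) * (k : Int) + (i : Int) = ((offn * k + i : Nat) : Int) by push_cast; ring,
    Nat.cast_lt]
  obtain ⟨b, rfl⟩ : ∃ b, mN = b + 1 := ⟨mN - 1, by omega⟩
  simp only [Nat.add_sub_cancel] at hsum
  unfold pvCnt
  by_cases h : i < lastN
  · rw [if_pos h]
    constructor
    · intro _; omega
    · intro _
      have h1 : offn * k ≤ offn * b := Nat.mul_le_mul_left _ (by omega)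
      have h2 : b * offn = offn * b := Nat.mul_comm _ _
      omega
  · rw [if_neg h]
    simp only [Nat.add_sub_cancel]
    constructor
    · intro hlt
      by_contra hge
      have hkb : k = b := by omega
      rw [hkb] at hlt
      have h2 : b * offn = offn * b := Nat.mul_comm _ _
      omega
    · intro hkb
      have h1 : offn * k + offn ≤ offn * b := by
        calc offn * k + offn = offn * (k + 1) := by ring
          _ ≤ offn * b := Nat.mul_le_mul_left _ (by omega)
      have h2 : b * offn = offn * b := Nat.mul_comm _ _
      omega

-- the whole else-branch of A equals the whole else-branch of B, for any off ≥ 1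
theorem pv_core (cbs : List (String × String)) (off : Int) (hoff : 1 ≤ off) :
    (PySem.List.pyRange 0 off 1).foldl (fun acc i =>
      (PySem.List.pyRange 0 ((cbs.length : Int)) off).foldl (fun acc2 j =>
        if j + i < ((cbs.length : Int)) then
          acc2 ++ [PySem.List.pyGetD cbs (j + i) ("", "")]
        else acc2) acc) []
    = (PySem.List.pyRange 0 ((cbs.length : Int)) 1).map (fun q =>
        PySem.List.pyGetD cbs
          (pvSrc ((cbs.length : Int) - off * (PySem.Int.floordiv ((cbs.length : Int) + off - 1) off - 1))
            (PySem.Int.floordiv ((cbs.length : Int) + off - 1) off) off q) ("", "")) := by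
  set n : Int := (cbs.length : Int) with hn
  set offn : Nat := off.toNat with hoffn
  have hoffc : off = (offn : Int) := by omega
  have hoffn1 : 1 ≤ offn := by omega
  by_cases hz : cbs.length = 0
  · have h1 : PySem.List.pyRange 0 n off = [] := by
      rw [PySem.List.pyRange_of_pos _ _ (show (0:Int) < off by omega)]
      rw [if_neg (by omega)]
      simp
    have h2 : PySem.List.pyRange 0 n 1 = [] := by
      rw [PySem.List.pyRange_of_pos _ _ (show (0:Int) < 1 by omega)]
      rw [if_neg (by omega)]
      simp
    rw [h1, h2]
    simp [List.foldl_fixed]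
  · have hnn1 : 1 ≤ cbs.length := by omega
    set mN : Nat := (cbs.length + offn - 1) / offn with hmN
    set lastN : Nat := cbs.length - (mN - 1) * offn with hlastN
    obtain ⟨hm1, hl1, hl2, hsumN⟩ := pv_grid_facts cbs.length offn mN hoffn1 hnn1 hmN.symm
    have hmc : PySem.Int.floordiv (n + off - 1) off = (mN : Int) := by
      rw [show n + off - 1 = ((cbs.length + offn - 1 : Nat) : Int) by omega, hoffc,
        PySem.Int.floordiv_natCast]
    have hle : (mN - 1) * offn ≤ cbs.length := by omega
    have hlastc : n - off * ((mN : Int) - 1) = (lastN : Int) := by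
      rw [hlastN, hoffc]
      push_cast [Nat.cast_sub hle, Nat.cast_sub hm1]
      ring
    rw [hmc, hlastc]
    -- A: foldl → flatMap of per-column filterMaps
    rw [PySem.List.foldl_congr_mem _ _
      (fun acc i => acc ++ (PySem.List.pyRange 0 n off).filterMap
        (fun j => if j + i < n then some (PySem.List.pyGetD cbs (j + i) ("", "")) else none)) _
      (by
        intro acc i _
        exact pv_foldl_ite_append (fun j => j + i < n)
          (fun j => PySem.List.pyGetD cbs (j + i) ("", "")) _ acc)]
    rw [PySem.List.foldl_append_eq_flatMap, List.nil_append]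
    -- concrete ranges
    have houter : PySem.List.pyRange 0 off 1 = (List.range offn).map (fun i => ((i : Nat) : Int)) := by
      rw [PySem.List.pyRange_of_pos _ _ (show (0:Int) < 1 by omega), if_pos (by omega),
        show (off - 0 + 1 - 1) / 1 = off by omega, hoffc, Int.toNat_natCast]
      simp only [zero_add, one_mul]
    have hinner : PySem.List.pyRange 0 n off = (List.range mN).map (fun k : Nat => off * (k : Int)) := by
      rw [PySem.List.pyRange_of_pos _ _ (show (0:Int) < off by omega), if_pos (by omega),
        show n - 0 + off - 1 = n + off - 1 by ring,
        ← PySem.Int.floordiv_eq_ediv_of_pos (show (0:Int) < off by omega), hmc, Int.toNat_natCast]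
      simp only [zero_add]
    have hbrange : PySem.List.pyRange 0 n 1 = (List.range cbs.length).map (fun q => ((q : Nat) : Int)) := by
      rw [PySem.List.pyRange_of_pos _ _ (show (0:Int) < 1 by omega), if_pos (by omega),
        show (n - 0 + 1 - 1) / 1 = n by omega, hn, Int.toNat_natCast]
      simp only [zero_add, one_mul]
    rw [houter, hinner, hbrange]
    rw [List.flatMap_map, List.map_map]
    -- B: split range cbs.length into the column blocks
    have hstart_tot : pvStart mN lastN offn = cbs.length :=
      pvStart_total mN lastN offn cbs.length hl2 hsumN hm1
    rw [← hstart_tot, ← pvRange_flat mN lastN offn, List.map_flatMap]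
    apply List.flatMap_congr
    intro i hi
    have hi' : i < offn := List.mem_range.mp hi
    simp only [Function.comp_def]
    rw [List.filterMap_map]
    -- A column i: guard ↔ k < pvCnt, then prefix filterMap = map
    rw [List.filterMap_congr (g := fun k =>
      if k < pvCnt mN lastN i then some (PySem.List.pyGetD cbs (off * (k : Int) + (i : Int)) ("", "")) else none)
      (by
        intro k hk
        simp only [Function.comp_def]
        by_cases hg : off * (k : Int) + (i : Int) < n
        · rw [if_pos hg, if_pos (by
            apply (pv_guard_iff offn mN lastN cbs.length i k hl1 hl2 hsumN hm1 hi' (List.mem_range.mp hk)).mp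
            rw [← hoffc]; exact hg)]
        · rw [if_neg hg, if_neg (by
            intro hcnt
            apply hg
            have := (pv_guard_iff offn mN lastN cbs.length i k hl1 hl2 hsumN hm1 hi' (List.mem_range.mp hk)).mpr hcnt
            rw [hoffc]; exact this)])]
    rw [pv_filterMap_range_prefix
      (fun k => PySem.List.pyGetD cbs (off * (k : Int) + (i : Int)) ("", ""))
      (pvCnt mN lastN i) mN (by unfold pvCnt; split <;> omega)]
    -- B column i: evaluate the closed-form source at each block position
    rw [List.map_map]
    apply List.map_congr_left
    intro r hr
    have hr' : r < pvCnt mN lastN i := List.mem_range.mp hr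
    simp only [Function.comp_def]
    rw [hoffc]
    rw [pv_src_eq offn mN lastN i r hl1 hr']

-- the two ports agree on every input
theorem pv_ports_eq (contigs : List (String × String)) (num_cores : Int) :
    reorder_contigs contigs num_cores = reorder_contigs_alt contigs num_cores := by
  unfold reorder_contigs reorder_contigs_alt
  simp only [PySem.List.len_eq]
  set cbs := PySem.List.sorted contigs (fun x => PySem.Str.len x.2) false with hcbs
  by_cases hret : (cbs.length : Int) < num_cores * 2
  · simp [hret]
  · simp only [if_neg hret]
    have hoff : 1 ≤ PySem.Int.floordiv ((cbs.length : Int)) (max num_cores 8) + 1 := by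
      have h8 : (0 : Int) < max num_cores 8 := by
        have := le_max_right num_cores (8 : Int); omega
      have he : PySem.Int.floordiv ((cbs.length : Int)) (max num_cores 8)
          = (cbs.length : Int) / (max num_cores 8) := PySem.Int.floordiv_eq_ediv_of_pos h8
      have hnn : (0 : Int) ≤ (cbs.length : Int) / (max num_cores 8) :=
        Int.ediv_nonneg (by positivity) (le_of_lt h8)
      omega
    exact pv_core cbs _ hoff

-- ===== VERDICT (by name: the statement is the Claim_ definition above) =====
theorem reorder_contigs_spec : Claim_equal_reorder_contigs := by
  intro contigs num_cores _
  unfold Spec_reorder_contigs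
  exact pv_ports_eq contigs num_cores
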